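-- pv_equiv track=rewrite | github.com/yk-ds/fastgto-light | utils/winrate_utils.py | validate_cards
-- ===== SOURCE A (Python) =====
-- def validate_cards(card1_rank, card1_suit, card2_rank, card2_suit, board_cards):
--     """
--     Validate that all cards are unique
--
--     Parameters:
--     - card1_rank, card1_suit: First hole card
--     - card2_rank, card2_suit: Second hole card
--     - board_cards: List of (rank, suit) tuples for board cards
--
--     Returns:
--     - (is_valid, error_message)
--     """
--     # Convert to string representation for comparison
--     cards = []
--
--     # Add hole cards
--     if card1_rank and card1_suit:
--         cards.append(f"{card1_rank}{card1_suit}")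
--
--     if card2_rank and card2_suit:
--         cards.append(f"{card2_rank}{card2_suit}")
--
--     # Add board cards
--     for rank, suit in board_cards:
--         if rank and suit:
--             cards.append(f"{rank}{suit}")
--
--     # Check for duplicates
--     if len(cards) != len(set(cards)):
--         return False, "同じカードが複数選択されています。すべてのカードは一意である必要があります。"
--
--     return True, ""
-- ===== SOURCE B (Python) =====
-- DUP_MSG = "同じカードが複数選択されています。すべてのカードは一意である必要があります。"
--
--
-- def validate_cards(card1_rank, card1_suit, card2_rank, card2_suit, board_cards):
--     """Eager duplicate check: maintain a seen-set and return on the first repeat."""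
--     seen = set()
--     if card1_rank and card1_suit:
--         key = f"{card1_rank}{card1_suit}"
--         if key in seen:
--             return False, DUP_MSG
--         seen.add(key)
--     if card2_rank and card2_suit:
--         key = f"{card2_rank}{card2_suit}"
--         if key in seen:
--             return False, DUP_MSG
--         seen.add(key)
--     for rank, suit in board_cards:
--         if rank and suit:
--             key = f"{rank}{suit}"
--             if key in seen:
--                 return False, DUP_MSG
--             seen.add(key)
--     return True, ""
-- ===== Notes on version B (the rewrite author's own statement) =====
-- stated objective: alternative
-- what changed: Instead of building the full card list and comparing len(cards) to len(set(cards)) at the end, B maintains a seen-set incrementally and returns False immediately at the first repeated card, never materialising the list.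
import Mathlib
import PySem

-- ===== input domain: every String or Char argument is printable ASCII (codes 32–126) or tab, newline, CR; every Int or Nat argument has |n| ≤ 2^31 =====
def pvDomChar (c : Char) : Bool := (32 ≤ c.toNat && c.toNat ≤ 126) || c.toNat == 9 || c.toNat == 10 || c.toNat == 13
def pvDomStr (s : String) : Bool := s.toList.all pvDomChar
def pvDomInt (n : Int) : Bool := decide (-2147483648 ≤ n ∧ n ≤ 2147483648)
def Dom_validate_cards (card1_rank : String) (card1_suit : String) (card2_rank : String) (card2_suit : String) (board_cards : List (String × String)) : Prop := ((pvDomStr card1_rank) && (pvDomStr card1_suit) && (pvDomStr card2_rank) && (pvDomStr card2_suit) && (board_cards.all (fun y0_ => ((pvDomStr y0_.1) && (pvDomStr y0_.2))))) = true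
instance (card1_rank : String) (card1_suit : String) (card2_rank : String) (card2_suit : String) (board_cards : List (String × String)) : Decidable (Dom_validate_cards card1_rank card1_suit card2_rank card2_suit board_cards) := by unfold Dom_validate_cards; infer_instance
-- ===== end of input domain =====

-- B checks duplicates eagerly with an incrementally maintained seen-set (returning at the first
-- repeated card) instead of A's build-the-full-list-then-compare len(cards) vs len(set(cards)).

def dupMsg : String := "同じカードが複数選択されています。すべてのカードは一意である必要があります。"

-- ===== PORT A =====
def validate_cards (card1_rank : String) (card1_suit : String) (card2_rank : String) (card2_suit : String) (board_cards : List (String × String)) : Bool × String :=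
  let cards : List String := []
  let cards := if card1_rank ≠ "" ∧ card1_suit ≠ "" then cards ++ [card1_rank ++ card1_suit] else cards
  let cards := if card2_rank ≠ "" ∧ card2_suit ≠ "" then cards ++ [card2_rank ++ card2_suit] else cards
  let cards := board_cards.foldl (fun acc p => if p.1 ≠ "" ∧ p.2 ≠ "" then acc ++ [p.1 ++ p.2] else acc) cards
  if cards.length ≠ (PySem.Set.ofList cards).length then (false, dupMsg)
  else (true, "")

-- ===== PORT B =====
-- the 'for rank, suit in board_cards' loop of B, carrying the seen-set
def vcScanBoard (seen : PySem.Set String) : List (String × String) → Bool × String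
  | [] => (true, "")
  | (rank, suit) :: rest =>
    if rank ≠ "" ∧ suit ≠ "" then
      let key := rank ++ suit
      if PySem.Set.contains seen key then (false, dupMsg)
      else vcScanBoard (PySem.Set.add seen key) rest
    else vcScanBoard seen rest

-- one guarded hole-card step of B; none = B's early 'return False'
def vcAddHole (seen : PySem.Set String) (rank suit : String) : Option (PySem.Set String) :=
  if rank ≠ "" ∧ suit ≠ "" then
    let key := rank ++ suit
    if PySem.Set.contains seen key then none else some (PySem.Set.add seen key)
  else some seen

def validate_cards_alt (card1_rank : String) (card1_suit : String) (card2_rank : String) (card2_suit : String) (board_cards : List (String × String)) : Bool × String :=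
  match vcAddHole PySem.Set.empty card1_rank card1_suit with
  | none => (false, dupMsg)
  | some s1 =>
    match vcAddHole s1 card2_rank card2_suit with
    | none => (false, dupMsg)
    | some s2 => vcScanBoard s2 board_cards

-- ===== PRECONDITION & SPEC =====
def Spec_validate_cards (card1_rank : String) (card1_suit : String) (card2_rank : String) (card2_suit : String) (board_cards : List (String × String)) (out : Bool × String) : Prop := out = validate_cards_alt card1_rank card1_suit card2_rank card2_suit board_cards
instance (card1_rank : String) (card1_suit : String) (card2_rank : String) (card2_suit : String) (board_cards : List (String × String)) (out : Bool × String) : Decidable (Spec_validate_cards card1_rank card1_suit card2_rank card2_suit board_cards out) := by unfold Spec_validate_cards; infer_instance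

-- ===== CLAIM (what is proved, stated in full; the proofs are below) =====
def Claim_equal_validate_cards : Prop := ∀ (card1_rank : String) (card1_suit : String) (card2_rank : String) (card2_suit : String) (board_cards : List (String × String)), Dom_validate_cards card1_rank card1_suit card2_rank card2_suit board_cards → Spec_validate_cards card1_rank card1_suit card2_rank card2_suit board_cards (validate_cards card1_rank card1_suit card2_rank card2_suit board_cards)

-- ===== LEMMAS AND PROOFS =====

-- the guarded keys contributed by the board cards
def vcKeys : List (String × String) → List String
  | [] => []
  | p :: rest => if p.1 ≠ "" ∧ p.2 ≠ "" then (p.1 ++ p.2) :: vcKeys rest else vcKeys rest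

theorem vc_foldA (board : List (String × String)) : ∀ acc : List String,
    board.foldl (fun acc p => if p.1 ≠ "" ∧ p.2 ≠ "" then acc ++ [p.1 ++ p.2] else acc) acc
      = acc ++ vcKeys board := by
  induction board with
  | nil => intro acc; simp [vcKeys]
  | cons p rest ih =>
    intro acc
    simp only [List.foldl_cons, vcKeys]
    split <;> simp [ih]

theorem vc_ofList_len (xs : List String) :
    (PySem.Set.ofList xs).length = xs.length ↔ xs.Nodup := by
  induction xs using List.reverseRecOn with
  | nil => simp
  | append_singleton ys x ih =>
    rw [PySem.Set.ofList_append_singleton]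
    by_cases hx : x ∈ ys
    · rw [PySem.Set.add_of_mem (by simpa [PySem.Set.mem_ofList] using hx)]
      have hle : (PySem.Set.ofList ys).length ≤ ys.length := PySem.Set.length_ofList_le ys
      have hR : ¬ (ys ++ [x]).Nodup := fun h =>
        (List.nodup_append.mp h).2.2 x hx x (List.mem_singleton_self x) rfl
      simp only [List.length_append, List.length_singleton]
      constructor
      · intro h; omega
      · intro h; exact absurd h hR
    · rw [PySem.Set.add_of_not_mem (by simpa [PySem.Set.mem_ofList] using hx)]
      have hR : (ys ++ [x]).Nodup ↔ ys.Nodup := by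
        simp only [List.nodup_append, List.nodup_singleton, true_and, and_iff_left_iff_imp]
        exact fun _ a ha b hb e => hx (by simp only [List.mem_singleton] at hb; rw [e, hb] at ha; exact ha)
      simp only [List.length_append, List.length_singleton, hR, ← ih]
      omega

theorem vc_A_if (cards : List String) :
    (if cards.length ≠ (PySem.Set.ofList cards).length then ((false : Bool), dupMsg) else (true, ""))
      = if cards.Nodup then ((true : Bool), "") else (false, dupMsg) := by
  by_cases h : cards.Nodup
  · rw [if_pos h, if_neg (by simp [(vc_ofList_len cards).mpr h])]
  · rw [if_neg h, if_pos (fun e => h ((vc_ofList_len cards).mp e.symm))]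

theorem vc_scanBoard_eq (board : List (String × String)) :
    ∀ seen : PySem.Set String, seen.Nodup →
      vcScanBoard seen board
        = if (seen ++ vcKeys board).Nodup then (true, "") else (false, dupMsg) := by
  induction board with
  | nil => intro seen hnd; simp [vcScanBoard, vcKeys, hnd]
  | cons p rest ih =>
    intro seen hnd
    obtain ⟨rank, suit⟩ := p
    by_cases hg : rank ≠ "" ∧ suit ≠ ""
    · simp only [vcScanBoard, vcKeys]
      rw [if_pos hg, if_pos hg]
      by_cases hc : (rank ++ suit) ∈ seen
      · rw [(PySem.Set.contains_iff seen (rank ++ suit)).mpr hc]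
        have hnot : ¬ (seen ++ (rank ++ suit) :: vcKeys rest).Nodup := fun h =>
          (List.nodup_append.mp h).2.2 _ hc _ (List.mem_cons_self) rfl
        rw [if_neg hnot, if_pos rfl]
      · have hcf : PySem.Set.contains seen (rank ++ suit) = false := by
          simpa using fun h => hc ((PySem.Set.contains_iff seen _).mp h)
        rw [hcf]
        simp only [Bool.false_eq_true, if_false]
        rw [PySem.Set.add_of_not_mem hc,
          ih (seen ++ [rank ++ suit]) (by
            simp only [List.nodup_append, List.nodup_singleton, true_and]
            exact ⟨hnd, fun a ha b hb e => hc (by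
              simp only [List.mem_singleton] at hb; rw [e, hb] at ha; exact ha)⟩)]
        rw [List.append_assoc]
        rfl
    · simp only [vcScanBoard, vcKeys]
      rw [if_neg hg, if_neg hg]
      exact ih seen hnd

theorem vcAddHole_dup (seen : PySem.Set String) (r t : String)
    (hg : r ≠ "" ∧ t ≠ "") (hm : (r ++ t) ∈ seen) : vcAddHole seen r t = none := by
  simp [vcAddHole, hg, hm]

theorem vcAddHole_fresh (seen : PySem.Set String) (r t : String)
    (hg : r ≠ "" ∧ t ≠ "") (hm : (r ++ t) ∉ seen) :
    vcAddHole seen r t = some (seen ++ [r ++ t]) := by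
  simp [vcAddHole, hg, hm]

theorem vcAddHole_skip (seen : PySem.Set String) (r t : String)
    (hg : ¬ (r ≠ "" ∧ t ≠ "")) : vcAddHole seen r t = some seen := by
  simp [vcAddHole, hg]

theorem main_eq (c1r c1s c2r c2s : String) (board : List (String × String)) :
    validate_cards c1r c1s c2r c2s board = validate_cards_alt c1r c1s c2r c2s board := by
  unfold validate_cards validate_cards_alt
  simp only [vc_foldA, vc_A_if]
  by_cases g1 : c1r ≠ "" ∧ c1s ≠ "" <;> by_cases g2 : c2r ≠ "" ∧ c2s ≠ ""
  · -- both hole cards present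
    rw [if_pos g1, if_pos g2,
      vcAddHole_fresh PySem.Set.empty c1r c1s g1 (List.not_mem_nil)]
    show _ = (match vcAddHole (PySem.Set.empty ++ [c1r ++ c1s]) c2r c2s with
      | none => ((false : Bool), dupMsg)
      | some s2 => vcScanBoard s2 board)
    by_cases he : c2r ++ c2s ∈ (PySem.Set.empty ++ [c1r ++ c1s])
    · rw [vcAddHole_dup _ c2r c2s g2 he]
      have he : c2r ++ c2s = c1r ++ c1s := by simpa [PySem.Set.empty] using he
      have hnot : ¬ (([] ++ [c1r ++ c1s] ++ [c2r ++ c2s]) ++ vcKeys board).Nodup := fun h => by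
        have h' : (c1r ++ c1s) ∉ (c2r ++ c2s) :: vcKeys board :=
          (List.nodup_cons.mp (by simpa using h)).1
        exact h' (by rw [he]; exact List.mem_cons_self)
      rw [if_neg hnot]
    · rw [vcAddHole_fresh _ c2r c2s g2 he]
      show _ = vcScanBoard (PySem.Set.empty ++ [c1r ++ c1s] ++ [c2r ++ c2s]) board
      rw [vc_scanBoard_eq board _ (by
        have hne : ¬ c1r ++ c1s = c2r ++ c2s := fun e => he (by simp [PySem.Set.empty, ← e])
        simpa [PySem.Set.empty] using hne)]
      rfl
  · -- only hole card 1
    rw [if_pos g1, if_neg g2,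
      vcAddHole_fresh PySem.Set.empty c1r c1s g1 (List.not_mem_nil)]
    show _ = (match vcAddHole (PySem.Set.empty ++ [c1r ++ c1s]) c2r c2s with
      | none => ((false : Bool), dupMsg)
      | some s2 => vcScanBoard s2 board)
    rw [vcAddHole_skip _ c2r c2s g2]
    show _ = vcScanBoard (PySem.Set.empty ++ [c1r ++ c1s]) board
    rw [vc_scanBoard_eq board _ (by simp [PySem.Set.empty])]
    rfl
  · -- only hole card 2
    rw [if_neg g1, if_pos g2, vcAddHole_skip PySem.Set.empty c1r c1s g1]
    show _ = (match vcAddHole PySem.Set.empty c2r c2s with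
      | none => ((false : Bool), dupMsg)
      | some s2 => vcScanBoard s2 board)
    rw [vcAddHole_fresh PySem.Set.empty c2r c2s g2 (List.not_mem_nil)]
    show _ = vcScanBoard (PySem.Set.empty ++ [c2r ++ c2s]) board
    rw [vc_scanBoard_eq board _ (by simp [PySem.Set.empty])]
    rfl
  · -- no hole cards
    rw [if_neg g1, if_neg g2, vcAddHole_skip PySem.Set.empty c1r c1s g1]
    show _ = (match vcAddHole PySem.Set.empty c2r c2s with
      | none => ((false : Bool), dupMsg)
      | some s2 => vcScanBoard s2 board)
    rw [vcAddHole_skip PySem.Set.empty c2r c2s g2]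
    show _ = vcScanBoard PySem.Set.empty board
    rw [vc_scanBoard_eq board _ (by simp [PySem.Set.empty])]
    rfl

-- ===== VERDICT (by name: the statement is the Claim_ definition above) =====
theorem validate_cards_spec : Claim_equal_validate_cards :=
  fun c1r c1s c2r c2s board _ => main_eq c1r c1s c2r c2s board
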